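-- pv_equiv track=rewrite | github.com/ChanMeng666/juejin-algorithm-practice | problems/061-optimal-flight-route/solution.py | solution
-- ===== SOURCE A (Python) =====
-- def solution(airports):
--     from collections import deque
--     n = len(airports)
--
--     # Use BFS to find the shortest path
--     queue = deque([(0, 0)])  # (position, number of flights)
--     visited = {0}  # Track visited positions
--
--     while queue:
--         pos, flights = queue.popleft()
--
--         # If we reached the destination, return the number of flights needed
--         if pos == n - 1:
--             return flights
--
--         # Try all possible next moves
--         next_positions = set()
--
--         # Add adjacent airports
--         if pos + 1 < n:
--             next_positions.add(pos + 1)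
--         if pos - 1 >= 0:
--             next_positions.add(pos - 1)
--
--         # Add other airports operated by the same airline
--         for i in range(n):
--             if airports[i] == airports[pos] and i != pos:
--                 next_positions.add(i)
--
--         # Iterate through all possible next positions
--         for next_pos in next_positions:
--             if next_pos not in visited:
--                 visited.add(next_pos)
--                 queue.append((next_pos, flights + 1))
--
--     return -1  # If the destination is unreachable
-- ===== SOURCE B (Python) =====
-- def solution(airports):
--     from collections import deque
--     n = len(airports)
--     if n == 0:
--         return -1
--     # Precompute airline -> ascending list of positions, once.
--     groups = {}
--     for i, a in enumerate(airports):
--         groups.setdefault(a, []).append(i)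
--     queue = deque([(0, 0)])
--     visited = {0}
--     while queue:
--         pos, flights = queue.popleft()
--         if pos == n - 1:
--             return flights
--         candidates = []
--         if pos + 1 < n:
--             candidates.append(pos + 1)
--         if pos - 1 >= 0:
--             candidates.append(pos - 1)
--         # Expand the whole airline group once, then drop it for good.
--         candidates += groups.pop(airports[pos], [])
--         for np in candidates:
--             if np not in visited:
--                 visited.add(np)
--                 queue.append((np, flights + 1))
--     return -1
-- ===== Notes on version B (the rewrite author's own statement) =====
-- stated objective: faster
-- what changed: B precomputes a dict airline -> list of positions once and pops each airline group on its first expansion, replacing A's O(n) same-airline scan performed at every dequeued BFS node.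
import Mathlib
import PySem

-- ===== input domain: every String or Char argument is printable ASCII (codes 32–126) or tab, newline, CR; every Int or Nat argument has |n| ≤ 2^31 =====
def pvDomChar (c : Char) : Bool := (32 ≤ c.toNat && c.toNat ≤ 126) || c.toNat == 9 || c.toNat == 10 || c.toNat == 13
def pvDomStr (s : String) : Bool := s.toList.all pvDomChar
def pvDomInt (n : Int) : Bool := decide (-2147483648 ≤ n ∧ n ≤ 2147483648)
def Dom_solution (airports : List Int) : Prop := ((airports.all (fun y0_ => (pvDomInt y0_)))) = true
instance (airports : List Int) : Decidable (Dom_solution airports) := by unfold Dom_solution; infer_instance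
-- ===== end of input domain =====

-- B replaces A's O(n) same-airline scan at every dequeued node by a dict airline -> positions
-- built once and popped on first use; measurably faster (asymptotic: O(n^2) -> O(n)).
-- Both Pythons iterate a set only where the BFS result is order-independent; the ports use insertion order there.

-- The inner enqueue loop, identical verbatim in both Pythons:
-- 'for np in …: if np not in visited: visited.add(np); queue.append((np, flights+1))'
def bfsEnq (flights : Int) (qv : List (Int × Int) × PySem.Set Int) (np : Int) :
    List (Int × Int) × PySem.Set Int :=
  if np ∈ qv.2 then qv else (qv.1 ++ [(np, flights + 1)], PySem.Set.add qv.2 np)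

-- ===== PORT A =====
-- fuel (airports.length + 1) is a totality guard only: BFS dequeues at most one node per
-- distinct visited position, so it is never exhausted before the queue empties.
def solutionGo (airports : List Int) : Nat → List (Int × Int) → PySem.Set Int → Int
  | 0, _, _ => -1
  | _ + 1, [], _ => -1
  | fuel + 1, (pos, flights) :: queue, visited =>
    let n : Int := airports.length
    if pos = n - 1 then flights
    else
      -- next_positions as an insertion-ordered set: pos+1, pos-1, then the same-airline scan.
      -- pyGetD is exact here: every dequeued pos with a nonempty scan satisfies 0 ≤ pos < n.
      let nps : PySem.Set Int :=
        (PySem.List.pyRange 0 n 1).foldl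
          (fun s i =>
            if PySem.List.pyGetD airports i 0 = PySem.List.pyGetD airports pos 0 ∧ i ≠ pos
            then PySem.Set.add s i else s)
          (let s0 : PySem.Set Int := PySem.Set.empty
           let s1 := if pos + 1 < n then PySem.Set.add s0 (pos + 1) else s0
           if pos - 1 ≥ 0 then PySem.Set.add s1 (pos - 1) else s1)
      let qv := nps.foldl (bfsEnq flights) (queue, visited)
      solutionGo airports fuel qv.1 qv.2

def solution (airports : List Int) : Int :=
  solutionGo airports (airports.length + 1) [(0, 0)] (PySem.Set.ofList [0])

-- ===== PORT B =====
-- groups: airline value -> ascending list of its positions (setdefault/append loop)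
def altGroups (airports : List Int) : PySem.Dict Int (List Int) :=
  (PySem.List.enumerate airports 0).foldl
    (fun d p => d.insert p.2 (d.getD p.2 [] ++ [p.1])) PySem.Dict.empty

def solutionAltGo (airports : List Int) :
    Nat → List (Int × Int) → PySem.Set Int → PySem.Dict Int (List Int) → Int
  | 0, _, _, _ => -1
  | _ + 1, [], _, _ => -1
  | fuel + 1, (pos, flights) :: queue, visited, groups =>
    let n : Int := airports.length
    if pos = n - 1 then flights
    else
      let key := PySem.List.pyGetD airports pos 0  -- exact: 0 ≤ pos < n on reachable states
      let cand :=
        ((if pos + 1 < n then [pos + 1] else []) ++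
         (if pos - 1 ≥ 0 then [pos - 1] else [])) ++
        groups.getD key []
      let groups' := groups.erase key              -- groups.pop(airports[pos], [])
      let qv := cand.foldl (bfsEnq flights) (queue, visited)
      solutionAltGo airports fuel qv.1 qv.2 groups'

def solution_alt (airports : List Int) : Int :=
  if airports.length = 0 then -1
  else solutionAltGo airports (airports.length + 1) [(0, 0)] (PySem.Set.ofList [0])
         (altGroups airports)

-- ===== PRECONDITION & SPEC =====
def Spec_solution (airports : List Int) (out : Int) : Prop := out = solution_alt airports
instance (airports : List Int) (out : Int) : Decidable (Spec_solution airports out) := by unfold Spec_solution; infer_instance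

-- ===== CLAIM (what is proved, stated in full; the proofs are below) =====
def Claim_equal_solution : Prop := ∀ (airports : List Int), Dom_solution airports → Spec_solution airports (solution airports)

-- ===== LEMMAS AND PROOFS =====

-- positions of airline value x, ascending (the reference value of a groups entry)
def allPosFor (airports : List Int) (x : Int) : List Int :=
  (PySem.List.pyRange 0 airports.length 1).filter
    (fun i => decide (PySem.List.pyGetD airports i 0 = x))

theorem mem_snd_bfsEnq {f : Int} {qv} {np x : Int} (h : x ∈ qv.2) :
    x ∈ (bfsEnq f qv np).2 := by
  unfold bfsEnq; split
  · exact h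
  · exact (PySem.Set.mem_add _ _ _).2 (Or.inl h)

theorem self_mem_snd_bfsEnq (f : Int) (qv) (np : Int) : np ∈ (bfsEnq f qv np).2 := by
  unfold bfsEnq; split
  · assumption
  · exact (PySem.Set.mem_add _ _ _).2 (Or.inr rfl)

theorem mem_snd_foldl_bfsEnq {f : Int} {l : List Int} {qv} {x : Int} (h : x ∈ qv.2) :
    x ∈ (l.foldl (bfsEnq f) qv).2 := by
  induction l generalizing qv with
  | nil => exact h
  | cons y t ih => exact ih (mem_snd_bfsEnq h)

theorem mem_list_mem_snd_foldl_bfsEnq {f : Int} {l : List Int} {qv} {x : Int} (h : x ∈ l) :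
    x ∈ (l.foldl (bfsEnq f) qv).2 := by
  induction l generalizing qv with
  | nil => cases h
  | cons y t ih =>
    rcases List.mem_cons.1 h with rfl | h'
    · simp only [List.foldl_cons]
      exact mem_snd_foldl_bfsEnq (self_mem_snd_bfsEnq f qv x)
    · exact ih h'

-- drop an element that is already visited or occurs earlier in the list
theorem foldl_bfsEnq_drop {f : Int} (l₁ : List Int) {x : Int} (l₂ : List Int) (qv)
    (h : x ∈ qv.2 ∨ x ∈ l₁) :
    (l₁ ++ x :: l₂).foldl (bfsEnq f) qv = (l₁ ++ l₂).foldl (bfsEnq f) qv := by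
  induction l₁ generalizing qv with
  | nil =>
    rcases h with h | h
    · simp only [List.nil_append, List.foldl_cons]
      have : bfsEnq f qv x = qv := by unfold bfsEnq; simp [h]
      rw [this]
    · cases h
  | cons y t ih =>
    simp only [List.cons_append, List.foldl_cons]
    apply ih
    rcases h with h | h
    · exact Or.inl (mem_snd_bfsEnq h)
    · rcases List.mem_cons.1 h with rfl | h'
      · exact Or.inl (self_mem_snd_bfsEnq f qv x)
      · exact Or.inr h'

-- restrict the tail of the scan to a filter, provided the removed elements are redundant
theorem foldl_bfsEnq_filter {f : Int} (p : Int → Bool) (l₂ l₁ : List Int) (qv)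
    (h : ∀ x ∈ l₂, p x = false → x ∈ qv.2 ∨ x ∈ l₁) :
    (l₁ ++ l₂).foldl (bfsEnq f) qv = (l₁ ++ l₂.filter p).foldl (bfsEnq f) qv := by
  induction l₂ generalizing l₁ with
  | nil => rfl
  | cons x t ih =>
    by_cases hx : p x = true
    · have h1 : l₁ ++ x :: t = (l₁ ++ [x]) ++ t := by simp
      have h2 : l₁ ++ (x :: t).filter p = (l₁ ++ [x]) ++ t.filter p := by
        simp [hx]
      rw [h1, h2]
      exact ih (l₁ ++ [x]) (fun y hy hpy => (h y (List.mem_cons_of_mem x hy) hpy).imp id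
        (fun hm => List.mem_append.2 (Or.inl hm)))
    · have hx' : p x = false := by simpa using hx
      rw [foldl_bfsEnq_drop l₁ t qv (h x (List.mem_cons_self) hx')]
      have h2 : (x :: t).filter p = t.filter p := by simp [hx']
      rw [h2]
      exact ih l₁ (fun y hy hpy => h y (List.mem_cons_of_mem x hy) hpy)

-- every element of the result queue is old, or newly enqueued from the scanned list
theorem mem_fst_foldl_bfsEnq {f : Int} {l : List Int} {qv} {pr : Int × Int}
    (h : pr ∈ (l.foldl (bfsEnq f) qv).1) :
    pr ∈ qv.1 ∨ (pr.1 ∈ l ∧ pr.2 = f + 1) := by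
  induction l generalizing qv with
  | nil => exact Or.inl h
  | cons y t ih =>
    rcases ih h with h' | h'
    · unfold bfsEnq at h'
      split at h'
      · exact Or.inl h'
      · rcases List.mem_append.1 h' with hm | hm
        · exact Or.inl hm
        · simp at hm
          subst hm
          exact Or.inr ⟨by simp, rfl⟩
    · exact Or.inr ⟨List.mem_cons_of_mem y h'.1, h'.2⟩

theorem get?_erase_ne {ν : Type} (d : PySem.Dict Int ν) (k k' : Int) (h : k' ≠ k) :
    (d.erase k).get? k' = d.get? k' := by
  have hp : ∀ p : Int × ν, (!decide (p.1 = k) && decide (p.1 = k')) = (p.1 == k') := by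
    intro p; by_cases he : p.1 = k' <;> simp [he]; omega
  simp [PySem.Dict.erase, PySem.Dict.get?, List.find?_filter, hp]

theorem get?_erase_self {ν : Type} (d : PySem.Dict Int ν) (k : Int) :
    (d.erase k).get? k = none := by
  simp [PySem.Dict.erase, PySem.Dict.get?, List.find?_filter]

-- altGroups is exactly allPosFor on present keys; absent keys have no positions
theorem allPosFor_append (xs : List Int) (a x : Int) :
    allPosFor (xs ++ [a]) x =
      allPosFor xs x ++ (if a = x then [(xs.length : Int)] else []) := by
  unfold allPosFor
  have h1 : ((xs ++ [a]).length : Int) = (xs.length : Int) + 1 := by simp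
  rw [h1, PySem.List.pyRange_one_succ_right (by positivity)]
  rw [List.filter_append]
  congr 1
  · apply List.filter_congr
    intro i hi
    have hi' := PySem.List.mem_pyRange_one.1 hi
    have : PySem.List.pyGetD (xs ++ [a]) i 0 = PySem.List.pyGetD xs i 0 := by
      rw [PySem.List.pyGetD_of_nonneg _ _ hi'.1, PySem.List.pyGetD_of_nonneg _ _ hi'.1]
      have hlt : i.toNat < xs.length := by omega
      simp [List.getD, List.getElem?_append_left hlt]
    rw [this]
  · have : PySem.List.pyGetD (xs ++ [a]) (xs.length : Int) 0 = a := by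
      rw [PySem.List.pyGetD_natCast]
      simp [List.getD]
    by_cases h : a = x <;> simp [List.filter, this, h]

theorem altGroups_append (xs : List Int) (a : Int) :
    altGroups (xs ++ [a]) =
      (altGroups xs).insert a ((altGroups xs).getD a [] ++ [(xs.length : Int)]) := by
  unfold altGroups
  rw [PySem.List.enumerate_append, List.foldl_append]
  simp [PySem.List.enumerate]

theorem altGroups_get? (airports : List Int) (x : Int) :
    (altGroups airports).get? x =
      if allPosFor airports x = [] then none else some (allPosFor airports x) := by
  induction airports using List.reverseRecOn with
  | nil => simp [altGroups, allPosFor, PySem.List.enumerate, PySem.Dict.get?, PySem.Dict.empty, PySem.List.pyRange]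
  | append_singleton xs a ih =>
    rw [altGroups_append, allPosFor_append]
    by_cases hx : x = a
    · subst hx
      rw [PySem.Dict.get?_insert_self]
      have hg : (altGroups xs).getD x [] = allPosFor xs x := by
        rw [PySem.Dict.getD, ih]
        split <;> simp_all
      rw [hg]
      simp
    · rw [PySem.Dict.get?_insert_of_ne _ _ hx, ih]
      have : a ≠ x := fun h => hx h.symm
      simp [this]

-- the base set {pos+1?, pos-1?} of A, as the plain list C that B builds
theorem baseSet_eq (pos n : Int) :
    (let s0 : PySem.Set Int := PySem.Set.empty
     let s1 := if pos + 1 < n then PySem.Set.add s0 (pos + 1) else s0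
     if pos - 1 ≥ 0 then PySem.Set.add s1 (pos - 1) else s1)
    = ((if pos + 1 < n then [pos + 1] else []) ++ (if pos - 1 ≥ 0 then [pos - 1] else [])) := by
  have hne : pos - 1 ≠ pos + 1 := by omega
  split_ifs with h1 h2 <;>
    simp [PySem.Set.empty, hne]

-- A's same-airline scan, as C ++ (a filtered allPosFor list)
theorem scanA_eq (airports : List Int) (pos : Int) (C : List Int) :
    (PySem.List.pyRange 0 (airports.length : Int) 1).foldl
      (fun s i =>
        if PySem.List.pyGetD airports i 0 = PySem.List.pyGetD airports pos 0 ∧ i ≠ pos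
        then PySem.Set.add s i else s) C
    = C ++ (allPosFor airports (PySem.List.pyGetD airports pos 0)).filter
        (fun i => decide (i ≠ pos) && !(PySem.Set.contains C i)) := by
  have hfun : (fun (s : PySem.Set Int) (i : Int) =>
        if PySem.List.pyGetD airports i 0 = PySem.List.pyGetD airports pos 0 ∧ i ≠ pos
        then PySem.Set.add s i else s)
      = (fun s i =>
          if (decide (PySem.List.pyGetD airports i 0 = PySem.List.pyGetD airports pos 0 ∧ i ≠ pos)) = true
          then PySem.Set.add s i else s) := by
    funext s i
    by_cases h : PySem.List.pyGetD airports i 0 = PySem.List.pyGetD airports pos 0 ∧ i ≠ pos <;>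
      simp [h]
  rw [hfun, ← List.foldl_filter]
  have hupd : (List.filter
        (fun i => decide (PySem.List.pyGetD airports i 0 = PySem.List.pyGetD airports pos 0 ∧ i ≠ pos))
        (PySem.List.pyRange 0 (airports.length : Int) 1)).foldl PySem.Set.add C
      = PySem.Set.update C (List.filter
        (fun i => decide (PySem.List.pyGetD airports i 0 = PySem.List.pyGetD airports pos 0 ∧ i ≠ pos))
        (PySem.List.pyRange 0 (airports.length : Int) 1)) := rfl
  rw [hupd, PySem.Set.update_eq_append_filter,
      PySem.Set.ofList_eq_self_of_nodup _ ((PySem.List.nodup_pyRange_one _ _).filter _)]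
  congr 1
  unfold allPosFor
  rw [List.filter_filter, List.filter_filter]
  apply List.filter_congr
  intro i _
  by_cases h1 : PySem.List.pyGetD airports i 0 = PySem.List.pyGetD airports pos 0 <;>
    by_cases h2 : i = pos <;> simp [h1, h2]

-- the main bisimulation: with the groups invariant, each BFS step enqueues the same
-- queue/visited pair in both ports
set_option maxHeartbeats 1000000 in
theorem bisim (airports : List Int) (fuel : Nat) :
    ∀ (queue : List (Int × Int)) (visited : PySem.Set Int)
      (groups : PySem.Dict Int (List Int)),
      (∀ pr ∈ queue, pr.1 ∈ visited ∧ 0 ≤ pr.1 ∧ pr.1 < (airports.length : Int)) →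
      (∀ x l, groups.get? x = some l → l = allPosFor airports x) →
      (∀ x, groups.get? x = none → ∀ i ∈ allPosFor airports x, i ∈ visited) →
      solutionGo airports fuel queue visited = solutionAltGo airports fuel queue visited groups := by
  induction fuel with
  | zero => intro queue visited groups _ _ _; rfl
  | succ f ih =>
    rintro (_ | ⟨⟨pos, flights⟩, rest⟩) visited groups qinv inv1 inv2
    · rfl
    · obtain ⟨hvpos, hpos0, hposn⟩ := qinv (pos, flights) List.mem_cons_self
      simp only [solutionGo, solutionAltGo]
      by_cases hdest : pos = (airports.length : Int) - 1
      · simp [hdest]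
      · simp only [if_neg hdest]
        set key := PySem.List.pyGetD airports pos 0 with hkey
        set C : List Int :=
          ((if pos + 1 < (airports.length : Int) then [pos + 1] else []) ++
           (if pos - 1 ≥ 0 then [pos - 1] else [])) with hC
        have hCmem : ∀ x ∈ C, 0 ≤ x ∧ x < (airports.length : Int) := by
          intro x hx
          rw [hC] at hx
          rcases List.mem_append.1 hx with hx | hx
          · by_cases h : pos + 1 < (airports.length : Int)
            · rw [if_pos h] at hx
              simp only [List.mem_singleton] at hx
              omega
            · rw [if_neg h] at hx; cases hx
          · by_cases h : pos - 1 ≥ 0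
            · rw [if_pos h] at hx
              simp only [List.mem_singleton] at hx
              omega
            · rw [if_neg h] at hx; cases hx
        have hscan := scanA_eq airports pos C
        rw [baseSet_eq pos (airports.length : Int), hscan]
        -- B's candidate list
        rcases hg : groups.get? key with _ | l
        · -- key's group already expanded: the whole airline is visited
          have hvis : ∀ i ∈ allPosFor airports key, i ∈ visited := inv2 key hg
          have hgetD : groups.getD key [] = [] := by simp [PySem.Dict.getD, hg]
          rw [hgetD]
          have hdrop := foldl_bfsEnq_filter (f := flights) (fun _ => false)
            ((allPosFor airports key).filter (fun i => decide (i ≠ pos) && !(PySem.Set.contains C i)))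
            C (rest, visited)
            (by intro x hx _
                exact Or.inl (hvis x (List.mem_of_mem_filter hx)))
          rw [List.filter_false] at hdrop
          rw [hdrop]
          apply ih
          · intro pr hpr
            rcases mem_fst_foldl_bfsEnq hpr with hold | hnew
            · obtain ⟨h1, h2, h3⟩ := qinv pr (List.mem_cons_of_mem _ hold)
              exact ⟨mem_snd_foldl_bfsEnq h1, h2, h3⟩
            · refine ⟨mem_list_mem_snd_foldl_bfsEnq hnew.1, ?_⟩
              rcases List.mem_append.1 hnew.1 with hx | hx
              · exact hCmem _ hx
              · cases hx
          · intro x l hx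
            by_cases hxk : x = key
            · subst hxk; rw [get?_erase_self] at hx; cases hx
            · rw [get?_erase_ne _ _ _ hxk] at hx; exact inv1 x l hx
          · intro x hx i hi
            by_cases hxk : x = key
            · subst hxk
              exact mem_snd_foldl_bfsEnq (hvis i hi)
            · rw [get?_erase_ne _ _ _ hxk] at hx
              exact mem_snd_foldl_bfsEnq (inv2 x hx i hi)
        · -- key's group still present: it is exactly allPosFor key
          have hl : l = allPosFor airports key := inv1 key l hg
          have hgetD : groups.getD key [] = allPosFor airports key := by
            simp [PySem.Dict.getD, hg, hl]
          rw [hgetD]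
          have hdrop := foldl_bfsEnq_filter (f := flights)
            (fun i => decide (i ≠ pos) && !(PySem.Set.contains C i))
            (allPosFor airports key) C (rest, visited)
            (by intro x hx hpx
                simp only [Bool.and_eq_false_iff] at hpx
                rcases hpx with hpx | hpx
                · left
                  have : x = pos := by simpa using hpx
                  subst this; exact hvpos
                · right
                  have : PySem.Set.contains C x = true := by
                    cases h : PySem.Set.contains C x
                    · rw [h] at hpx; simp at hpx
                    · rfl
                  simpa [PySem.Set.contains] using this)
          rw [← hdrop]
          apply ih
          · intro pr hpr
            rcases mem_fst_foldl_bfsEnq hpr with hold | hnew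
            · obtain ⟨h1, h2, h3⟩ := qinv pr (List.mem_cons_of_mem _ hold)
              exact ⟨mem_snd_foldl_bfsEnq h1, h2, h3⟩
            · refine ⟨mem_list_mem_snd_foldl_bfsEnq hnew.1, ?_⟩
              rcases List.mem_append.1 hnew.1 with hx | hx
              · exact hCmem _ hx
              · have := PySem.List.mem_pyRange_one.1 (List.mem_of_mem_filter (by
                  unfold allPosFor at hx; exact hx))
                exact this
          · intro x l' hx
            by_cases hxk : x = key
            · subst hxk; rw [get?_erase_self] at hx; cases hx
            · rw [get?_erase_ne _ _ _ hxk] at hx; exact inv1 x l' hx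
          · intro x hx i hi
            by_cases hxk : x = key
            · subst hxk
              exact mem_list_mem_snd_foldl_bfsEnq (List.mem_append.2 (Or.inr hi))
            · rw [get?_erase_ne _ _ _ hxk] at hx
              exact mem_snd_foldl_bfsEnq (inv2 x hx i hi)

-- ===== VERDICT (by name: the statement is the Claim_ definition above) =====
theorem solution_spec : Claim_equal_solution := by
  intro airports _
  unfold Spec_solution
  by_cases hn : airports.length = 0
  · have he : airports = [] := List.eq_nil_of_length_eq_zero hn
    subst he; decide
  · unfold solution solution_alt
    rw [if_neg hn]
    apply bisim
    · intro pr hpr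
      simp only [List.mem_singleton] at hpr
      subst hpr
      refine ⟨by simp [PySem.Set.ofList], by simp, by omega⟩
    · intro x l h
      rw [altGroups_get? airports x] at h
      split at h
      · cases h
      · exact (Option.some_inj.1 h).symm
    · intro x h i hi
      rw [altGroups_get? airports x] at h
      split at h
      · simp_all
      · cases h
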